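-- pv_equiv track=rewrite | github.com/YonatanNemtsov/mathnote-ocr | tools/collect_expr_server.py | _find_brace_end
-- ===== SOURCE A (Python) =====
-- def _find_brace_end(latex: str, pos: int) -> int:
--     """Find the end of a {}-delimited group starting at pos."""
--     if pos >= len(latex) or latex[pos] != '{':
--         return pos
--     depth = 1
--     k = pos + 1
--     while k < len(latex) and depth > 0:
--         if latex[k] == '{':
--             depth += 1
--         elif latex[k] == '}':
--             depth -= 1
--         k += 1
--     return k
-- ===== SOURCE B (Python) =====
-- def _find_brace_end(latex: str, pos: int) -> int:
--     """Find the end of a {}-delimited group starting at pos (recursive descent)."""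
--     if pos >= len(latex) or latex[pos] != '{':
--         return pos
--     k = pos + 1
--     while k < len(latex):
--         c = latex[k]
--         if c == '{':
--             k = _find_brace_end(latex, k)   # skip the nested group
--         elif c == '}':
--             return k + 1
--         else:
--             k += 1
--     return k
-- ===== Notes on version B (the rewrite author's own statement) =====
-- stated objective: alternative
-- what changed: Replaces A's flat depth-counter loop with recursive descent over the nested brace structure: the scan recurses to skip each inner {...} group and returns right after the first unmatched '}'.
import Mathlib
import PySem

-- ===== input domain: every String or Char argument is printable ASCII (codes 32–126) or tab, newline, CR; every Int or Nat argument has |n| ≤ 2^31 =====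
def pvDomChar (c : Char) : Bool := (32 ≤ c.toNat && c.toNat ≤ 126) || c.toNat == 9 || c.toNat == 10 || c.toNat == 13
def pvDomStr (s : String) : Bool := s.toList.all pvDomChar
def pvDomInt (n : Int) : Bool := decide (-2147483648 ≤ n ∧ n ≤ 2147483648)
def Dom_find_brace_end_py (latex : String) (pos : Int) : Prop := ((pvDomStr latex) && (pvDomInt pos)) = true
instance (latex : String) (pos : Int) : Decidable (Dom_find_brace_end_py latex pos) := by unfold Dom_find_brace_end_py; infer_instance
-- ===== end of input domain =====

-- B replaces A's flat depth-counter loop with recursive descent over the nested brace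
-- structure (objective: alternative decomposition, same cost).

-- ===== PORT A =====
-- the 'while k < len(latex) and depth > 0' loop; latex[k] is Python indexing (negative wraps)
def pvLoopA (s : List Char) (k depth : Int) : Int :=
  if h : k < (s.length : Int) ∧ 0 < depth then
    pvLoopA s (k + 1)
      (match PySem.List.pyGet? s k with
       | some '{' => depth + 1
       | some '}' => depth - 1
       | _ => depth)
  else k
termination_by ((s.length : Int) + 1 - k).toNat
decreasing_by omega

def find_brace_end_py (latex : String) (pos : Int) : Int :=
  if (latex.toList.length : Int) ≤ pos then pos
  else match PySem.Str.pyGet? latex pos with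
    | some '{' => pvLoopA latex.toList (pos + 1) 1
    | _ => pos

-- ===== PORT B =====
-- mutual fueled transcription of B: pvAltFind is _find_brace_end, pvAltScan its while loop;
-- the fuel is only a totality guard (never exhausted for fuel ≥ len - pos / > len - k).
mutual
def pvAltFind (s : List Char) : Nat → Int → Int
  | 0, pos => pos
  | f + 1, pos =>
    if (s.length : Int) ≤ pos then pos
    else match PySem.List.pyGet? s pos with
      | some '{' => pvAltScan s f (pos + 1)
      | _ => pos
def pvAltScan (s : List Char) : Nat → Int → Int
  | 0, k => k
  | f + 1, k =>
    if (s.length : Int) ≤ k then k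
    else match PySem.List.pyGet? s k with
      | some '{' => pvAltScan s f (pvAltFind s f k)   -- k = _find_brace_end(latex, k)
      | some '}' => k + 1
      | _ => pvAltScan s f (k + 1)
end

def find_brace_end_py_alt (latex : String) (pos : Int) : Int :=
  pvAltFind latex.toList (4 * latex.toList.length + 1) pos

-- ===== PRECONDITION & SPEC =====
-- Pre_ excludes exactly pos < -len(latex), where A's initial latex[pos] raises IndexError
-- (B raises there too).
def Pre_find_brace_end_py (latex : String) (pos : Int) : Prop :=
  -(latex.toList.length : Int) ≤ pos
instance (latex : String) (pos : Int) : Decidable (Pre_find_brace_end_py latex pos) := by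
  unfold Pre_find_brace_end_py; infer_instance
def pvWitness_find_brace_end_py : String × Int := ("{a{b}}c", 0)

def Spec_find_brace_end_py (latex : String) (pos : Int) (out : Int) : Prop := out = find_brace_end_py_alt latex pos
instance (latex : String) (pos : Int) (out : Int) : Decidable (Spec_find_brace_end_py latex pos out) := by unfold Spec_find_brace_end_py; infer_instance

-- ===== CLAIM (what is proved, stated in full; the proofs are below) =====
def Claim_equal_find_brace_end_py : Prop := ∀ (latex : String) (pos : Int), Dom_find_brace_end_py latex pos → Pre_find_brace_end_py latex pos → Spec_find_brace_end_py latex pos (find_brace_end_py latex pos)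

-- ===== LEMMAS AND PROOFS =====

-- unfolding and exit lemmas for A's loop
theorem pvLoopA_exit (s : List Char) (k depth : Int)
    (h : ¬(k < (s.length : Int) ∧ 0 < depth)) : pvLoopA s k depth = k := by
  rw [pvLoopA]; exact dif_neg h

theorem pvLoopA_step (s : List Char) (k depth : Int)
    (h : k < (s.length : Int) ∧ 0 < depth) :
    pvLoopA s k depth = pvLoopA s (k + 1)
      (match PySem.List.pyGet? s k with
       | some '{' => depth + 1
       | some '}' => depth - 1
       | _ => depth) := by
  rw [pvLoopA]; exact dif_pos h

-- A's loop never moves the cursor backwards.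
theorem pvLoopA_ge (s : List Char) (k depth : Int) : k ≤ pvLoopA s k depth := by
  rw [pvLoopA]
  split
  · rename_i h
    have := pvLoopA_ge s (k + 1)
      (match PySem.List.pyGet? s k with
       | some '{' => depth + 1 | some '}' => depth - 1 | _ => depth)
    omega
  · exact le_refl k
termination_by ((s.length : Int) + 1 - k).toNat
decreasing_by omega

-- Shift lemma: running A's loop at depth d+1 first reaches (as position) the exit point of
-- the depth-1 run, then continues at depth d.
theorem pvLoopA_shift (s : List Char) :
    ∀ (n : Nat) (k d : Int), ((s.length : Int) - k).toNat ≤ n → 1 ≤ d →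
      pvLoopA s k (d + 1) = pvLoopA s (pvLoopA s k 1) d := by
  intro n
  induction n with
  | zero =>
    intro k d hn hd
    have hk : (s.length : Int) ≤ k := by omega
    rw [pvLoopA_exit s k (d + 1) (by omega), pvLoopA_exit s k 1 (by omega),
      pvLoopA_exit s k d (by omega)]
  | succ n ih =>
    intro k d hn hd
    by_cases hk : k < (s.length : Int)
    · rw [pvLoopA_step s k (d + 1) (by omega)]
      conv_rhs => rw [pvLoopA_step s k 1 (by omega)]
      rcases hc : PySem.List.pyGet? s k with _ | c
      · exact ih (k + 1) d (by omega) hd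
      · by_cases h1 : c = '{'
        · subst h1
          show pvLoopA s (k + 1) (d + 1 + 1) = pvLoopA s (pvLoopA s (k + 1) (1 + 1)) d
          have hb1 : pvLoopA s (k + 1) (d + 1 + 1) = pvLoopA s (pvLoopA s (k + 1) 1) (d + 1) :=
            ih (k + 1) (d + 1) (by omega) (by omega)
          have hb2 : pvLoopA s (pvLoopA s (k + 1) 1) (d + 1)
              = pvLoopA s (pvLoopA s (pvLoopA s (k + 1) 1) 1) d := by
            have hm : k + 1 ≤ pvLoopA s (k + 1) 1 := pvLoopA_ge s (k + 1) 1
            exact ih (pvLoopA s (k + 1) 1) d (by omega) hd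
          have hb3 : pvLoopA s (k + 1) (1 + 1) = pvLoopA s (pvLoopA s (k + 1) 1) 1 :=
            ih (k + 1) 1 (by omega) (by omega)
          rw [hb1, hb2, ← hb3]
        · by_cases h2 : c = '}'
          · subst h2
            show pvLoopA s (k + 1) (d + 1 - 1) = pvLoopA s (pvLoopA s (k + 1) (1 - 1)) d
            rw [show d + 1 - 1 = d by ring, show (1 : Int) - 1 = 0 by ring,
              pvLoopA_exit s (k + 1) 0 (by omega)]
          · have e1 : (match (some c : Option Char) with
                | some '{' => d + 1 + 1 | some '}' => d + 1 - 1 | _ => d + 1) = d + 1 := by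
              split <;> simp_all
            have e2 : (match (some c : Option Char) with
                | some '{' => (1 : Int) + 1 | some '}' => (1 : Int) - 1 | _ => 1) = 1 := by
              split <;> simp_all
            rw [e1, e2]
            exact ih (k + 1) d (by omega) hd
    · rw [pvLoopA_exit s k (d + 1) (by omega), pvLoopA_exit s k 1 (by omega),
        pvLoopA_exit s k d (by omega)]

-- Main invariant: with enough fuel, B's find equals A's function body and B's scan equals
-- A's loop at depth 1.
theorem pv_main (s : List Char) :
    ∀ f : Nat,
      (∀ pos : Int, 2 * ((s.length : Int) - pos) ≤ (f : Int) →
        pvAltFind s f pos =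
          (if (s.length : Int) ≤ pos then pos
           else match PySem.List.pyGet? s pos with
             | some '{' => pvLoopA s (pos + 1) 1
             | _ => pos)) ∧
      (∀ k : Int, 2 * ((s.length : Int) - k) + 1 ≤ (f : Int) → pvAltScan s f k = pvLoopA s k 1) := by
  intro f
  induction f with
  | zero =>
    refine ⟨fun pos hp => ?_, fun k hk => ?_⟩
    · rw [pvAltFind, if_pos (by omega)]
    · rw [pvLoopA_exit s k 1 (by omega)]
      rfl
  | succ f ih =>
    refine ⟨fun pos hp => ?_, fun k hk => ?_⟩
    · rw [pvAltFind]
      by_cases hg : (s.length : Int) ≤ pos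
      · rw [if_pos hg, if_pos hg]
      · rw [if_neg hg, if_neg hg]
        rcases hc : PySem.List.pyGet? s pos with _ | c
        · rfl
        · by_cases h1 : c = '{'
          · subst h1
            exact ih.2 (pos + 1) (by omega)
          · by_cases h2 : c = '}'
            · subst h2; rfl
            · have e1 : (match (some c : Option Char) with
                  | some '{' => pvAltScan s f (pos + 1) | _ => pos) = pos := by
                split <;> simp_all
              have e2 : (match (some c : Option Char) with
                  | some '{' => pvLoopA s (pos + 1) 1 | _ => pos) = pos := by
                split <;> simp_all
              rw [e1, e2]
    · rw [pvAltScan]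
      by_cases hg : (s.length : Int) ≤ k
      · rw [if_pos hg, pvLoopA_exit s k 1 (by omega)]
      · rw [if_neg hg, pvLoopA_step s k 1 (by omega)]
        rcases hc : PySem.List.pyGet? s k with _ | c
        · exact ih.2 (k + 1) (by omega)
        · by_cases h1 : c = '{'
          · subst h1
            show pvAltScan s f (pvAltFind s f k) = pvLoopA s (k + 1) (1 + 1)
            have hfind : pvAltFind s f k = pvLoopA s (k + 1) 1 := by
              rw [ih.1 k (by omega), if_neg hg, hc]
              rfl
            have hm : k + 1 ≤ pvLoopA s (k + 1) 1 := pvLoopA_ge s (k + 1) 1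
            have hscan : pvAltScan s f (pvLoopA s (k + 1) 1)
                = pvLoopA s (pvLoopA s (k + 1) 1) 1 :=
              ih.2 (pvLoopA s (k + 1) 1) (by omega)
            rw [hfind, hscan,
              ← pvLoopA_shift s ((s.length : Int) - (k + 1)).toNat (k + 1) 1 (by omega) le_rfl]
          · by_cases h2 : c = '}'
            · subst h2
              show k + 1 = pvLoopA s (k + 1) (1 - 1)
              rw [show (1 : Int) - 1 = 0 by ring, pvLoopA_exit s (k + 1) 0 (by omega)]
            · have e1 : (match (some c : Option Char) with
                  | some '{' => pvAltScan s f (pvAltFind s f k)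
                  | some '}' => k + 1
                  | _ => pvAltScan s f (k + 1)) = pvAltScan s f (k + 1) := by
                split <;> simp_all
              have e2 : (match (some c : Option Char) with
                  | some '{' => (1 : Int) + 1 | some '}' => (1 : Int) - 1 | _ => 1) = 1 := by
                split <;> simp_all
              rw [e1, e2]
              exact ih.2 (k + 1) (by omega)

-- ===== VERDICT (by name: the statement is the Claim_ definition above) =====
theorem find_brace_end_py_spec : Claim_equal_find_brace_end_py := by
  intro latex pos _ hpre
  unfold Spec_find_brace_end_py find_brace_end_py find_brace_end_py_alt
  have hpre' : -(latex.toList.length : Int) ≤ pos := hpre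
  rw [(pv_main latex.toList (4 * latex.toList.length + 1)).1 pos (by push_cast; omega)]
  simp [PySem.Str.pyGet?]
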